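-- pv_equiv track=rewrite | github.com/artTerexov/InfEGE | 2022/Alexandra/task27/3166(kompege).py | F
-- ===== SOURCE A (Python) =====
-- def F(a):
--     a.pop(0)
--     total_rem = [1] + [0] * 10
--     count_amount = 0
--     count = 0
--     count_unique = 0
--     for i in a:
--         count_amount += i
--         if i % 5 == 0:
--             count_unique += 1
--         r = count_unique % 11
--         count += total_rem[r]
--         total_rem[r] += 1
--     return count
-- ===== SOURCE B (Python) =====
-- def F(a):
--     a.pop(0)
--     res = [0]
--     count_unique = 0
--     for i in a:
--         if i % 5 == 0:
--             count_unique += 1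
--         res.append(count_unique % 11)
--     total = 0
--     for r in range(11):
--         c = res.count(r)
--         total += c * (c - 1) // 2
--     return total
-- ===== Notes on version B (the rewrite author's own statement) =====
-- stated objective: alternative
-- what changed: B replaces A's single pass that maintains an 11-slot table and accumulates the pair count on the fly by two staged passes: first build the list of prefix residues (count of multiples of 5 mod 11), then for each residue r in range(11) take c = res.count(r) and sum c*(c-1)//2, using the identity that equal-residue prefix pairs number C(c,2); A's unused count_amount accumulator is dropped; Pre_ excludes only the empty list, on which both raise IndexError at a.pop(0).
import Mathlib
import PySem

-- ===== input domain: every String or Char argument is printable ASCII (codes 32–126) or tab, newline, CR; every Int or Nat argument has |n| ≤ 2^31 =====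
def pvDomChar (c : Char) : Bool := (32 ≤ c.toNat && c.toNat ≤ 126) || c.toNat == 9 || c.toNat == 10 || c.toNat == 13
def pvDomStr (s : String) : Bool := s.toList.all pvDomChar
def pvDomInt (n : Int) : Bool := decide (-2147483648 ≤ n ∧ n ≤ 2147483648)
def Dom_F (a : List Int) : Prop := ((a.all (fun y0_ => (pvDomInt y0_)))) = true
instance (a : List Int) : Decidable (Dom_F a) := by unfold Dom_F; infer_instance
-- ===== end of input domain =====

-- B restates the task in two staged passes (build the prefix-residue list, then sum c*(c-1)//2
-- of each residue's count) instead of A's single pass over an accumulating 11-slot table;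
-- RETURN values agree (both Pythons also pop a[0] in place, identically).

-- ===== PORT A =====
-- loop body of A: state = (total_rem, count_amount, count, count_unique)
-- the index r = count_unique % 11 is always in [0,11), so Python's total_rem[r] never raises;
-- getD/set with the (provably in-range) toNat index are exact here
def stepA (st : List Int × Int × Int × Int) (i : Int) : List Int × Int × Int × Int :=
  let ca := st.2.1 + i
  let cu := if PySem.Int.mod i 5 = 0 then st.2.2.2 + 1 else st.2.2.2
  let r := (PySem.Int.mod cu 11).toNat
  (st.1.set r (st.1.getD r 0 + 1), ca, st.2.2.1 + st.1.getD r 0, cu)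

def F (a : List Int) : Int :=
  match a with
  | [] => 0  -- Python raises IndexError at a.pop(0); excluded by Pre_F
  | _ :: rest => (rest.foldl stepA ([1,0,0,0,0,0,0,0,0,0,0], 0, 0, 0)).2.2.1

-- ===== PORT B =====
-- first pass of B: res.append(count_unique % 11); state = (res, count_unique)
def stepB (st : List Int × Int) (i : Int) : List Int × Int :=
  let cu := if PySem.Int.mod i 5 = 0 then st.2 + 1 else st.2
  (st.1 ++ [PySem.Int.mod cu 11], cu)

-- second pass of B: for r in range(11): c = res.count(r); total += c * (c - 1) // 2
def pairSum (res : List Int) : Int :=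
  (PySem.List.pyRange 0 11 1).foldl
    (fun total r =>
      total + PySem.Int.floordiv ((PySem.List.count res r : Int) * ((PySem.List.count res r : Int) - 1)) 2) 0

def F_alt (a : List Int) : Int :=
  match a with
  | [] => 0  -- Python raises IndexError at a.pop(0); excluded by Pre_F
  | _ :: rest => pairSum (rest.foldl stepB (([0] : List Int), 0)).1

-- ===== PRECONDITION & SPEC =====
-- Pre_F excludes only the empty list, on which A raises IndexError at a.pop(0)
def Pre_F (a : List Int) : Prop := a ≠ []
instance (a : List Int) : Decidable (Pre_F a) := by unfold Pre_F; infer_instance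
def pvWitness_F : List Int := ([3, 5, 7])

def Spec_F (a : List Int) (out : Int) : Prop := out = F_alt a
instance (a : List Int) (out : Int) : Decidable (Spec_F a out) := by unfold Spec_F; infer_instance

-- ===== CLAIM (what is proved, stated in full; the proofs are below) =====
def Claim_equal_F : Prop := ∀ (a : List Int), Dom_F a → Pre_F a → Spec_F a (F a)

-- ===== LEMMAS AND PROOFS =====

-- C(x+1,2) = C(x,2) + x, stated for Lean's `/` (equal to floordiv for the positive divisor 2)
lemma ediv_succ (x : Int) : (x + 1) * x / 2 = x * (x - 1) / 2 + x := by
  have e : (x + 1) * x = x * (x - 1) + x * 2 := by ring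
  rw [e, Int.add_mul_ediv_right _ _ (by norm_num : (2:Int) ≠ 0)]

lemma count_append1 (l : List Int) (r x : Int) :
    PySem.List.count (l ++ [r]) x = PySem.List.count l x + if r = x then 1 else 0 := by
  by_cases h : r = x <;> simp [PySem.List.count_eq, List.count_append, h]

-- appending one residue r ∈ [0,11) raises pairSum by the current count of r
lemma pairSum_append (l : List Int) (r : Int) (h0 : 0 ≤ r) (h1 : r < 11) :
    pairSum (l ++ [r]) = pairSum l + (PySem.List.count l r : Int) := by
  have hr : PySem.List.pyRange 0 11 1 = [0,1,2,3,4,5,6,7,8,9,10] := by decide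
  unfold pairSum
  rw [hr]
  simp only [List.foldl_cons, List.foldl_nil]
  interval_cases r <;> simp only [count_append1] <;> norm_num <;> rw [ediv_succ] <;> ring

-- A's table entry k always equals the count of residue k in B's residue list; under that
-- invariant, A's accumulated pair count advances exactly by pairSum's growth
lemma loop_eq : ∀ (rest tr res : List Int) (ca c cu : Int),
    tr.length = 11 →
    (∀ k : Nat, k < 11 → tr.getD k 0 = (PySem.List.count res (k : Int) : Int)) →
    (rest.foldl stepA (tr, ca, c, cu)).2.2.1
      = c + (pairSum (rest.foldl stepB (res, cu)).1 - pairSum res) := by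
  intro rest
  induction rest with
  | nil => intro tr res ca c cu _ _; simp
  | cons i rest ih =>
    intro tr res ca c cu hlen hinv
    simp only [List.foldl_cons, stepA, stepB]
    set cu' := if PySem.Int.mod i 5 = 0 then cu + 1 else cu with hcu
    set r := PySem.Int.mod cu' 11 with hrdef
    have hr0 : 0 ≤ r := PySem.Int.mod_nonneg _ (by norm_num)
    have hr11 : r < 11 := PySem.Int.mod_lt _ (by norm_num)
    have hrn : ((r.toNat : Int)) = r := Int.toNat_of_nonneg hr0
    have hrn11 : r.toNat < 11 := by omega
    have hget : tr.getD r.toNat 0 = (PySem.List.count res r : Int) := by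
      rw [hinv r.toNat hrn11, hrn]
    rw [ih (tr.set r.toNat (tr.getD r.toNat 0 + 1)) (res ++ [r]) _ _ _
        (by simpa using hlen)
        (by
          intro k hk
          rw [count_append1]
          have hset : (tr.set r.toNat (tr.getD r.toNat 0 + 1)).getD k 0
              = if r.toNat = k then tr.getD r.toNat 0 + 1 else tr.getD k 0 := by
            rw [List.getD_eq_getElem _ _ (by simpa [hlen] using hk),
                List.getElem_set (by simpa [hlen] using hk)]
            by_cases hkr : r.toNat = k
            · simp [hkr]
            · simp [hkr, List.getD_eq_getElem?_getD, List.getElem?_eq_getElem (show k < tr.length by omega)]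
          rw [hset]
          by_cases hkr : r.toNat = k
          · rw [if_pos hkr, ← hkr, hrn, if_pos rfl, hget]
            push_cast; ring
          · have hne : r ≠ (k : Int) := by omega
            rw [if_neg hkr, if_neg hne, hinv k hk]
            simp)]
    rw [pairSum_append _ _ hr0 hr11, hget]
    ring

-- ===== VERDICT (by name: the statement is the Claim_ definition above) =====
theorem F_spec : Claim_equal_F := by
  intro a _ hpre
  unfold Spec_F
  match a with
  | [] => exact absurd rfl hpre
  | _ :: rest =>
    show (rest.foldl stepA ([1,0,0,0,0,0,0,0,0,0,0], 0, 0, 0)).2.2.1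
        = pairSum (rest.foldl stepB (([0] : List Int), 0)).1
    rw [loop_eq rest [1,0,0,0,0,0,0,0,0,0,0] [0] 0 0 0 (by decide) (by decide)]
    have h0 : pairSum [0] = 0 := by decide
    rw [h0]; ring
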